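-- pv_equiv track=rewrite | github.com/AntoninBaudin/Slater_Python | Script_Antonin_BAUDIN.py | config_elec
-- ===== SOURCE A (Python) =====
-- def config_elec(Z):
--     s1 = 0
--     s2p2 = 0
--
--     for i in range(1,Z+1):
--         if i in range(1,3):
--             s1+=1
--         if i in range(3,10):
--             s2p2+=1
--     return s1,s2p2
-- ===== SOURCE B (Python) =====
-- def config_elec(Z):
--     # closed-form clamped arithmetic: 1s holds up to 2 electrons, 2s2p up to 7 more
--     return (min(max(Z, 0), 2), min(max(Z - 2, 0), 7))
-- ===== Notes on version B (the rewrite author's own statement) =====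
-- stated objective: faster
-- what changed: Replaced the O(Z) loop over range(1, Z+1) with a closed-form clamped arithmetic expression min/max per shell.
import Mathlib
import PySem

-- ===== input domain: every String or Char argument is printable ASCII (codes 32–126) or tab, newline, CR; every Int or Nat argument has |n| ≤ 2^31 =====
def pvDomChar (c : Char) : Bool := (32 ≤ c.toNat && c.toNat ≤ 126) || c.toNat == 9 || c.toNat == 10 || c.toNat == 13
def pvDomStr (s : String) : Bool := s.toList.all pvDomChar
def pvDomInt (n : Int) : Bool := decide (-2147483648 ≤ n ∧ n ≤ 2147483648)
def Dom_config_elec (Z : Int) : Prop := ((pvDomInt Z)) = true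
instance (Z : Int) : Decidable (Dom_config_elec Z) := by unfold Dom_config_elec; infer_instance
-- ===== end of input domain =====

-- B replaces A's O(Z) counting loop with a closed-form clamped arithmetic expression (objective: faster).

-- ===== PORT A =====
-- literal port of A's loop: for i in range(1, Z+1), bump s1 when i in range(1,3), bump s2p2 when i in range(3,10)
def config_elec (Z : Int) : List Int :=
  let st := (PySem.List.pyRange 1 (Z + 1) 1).foldl
    (fun (p : Int × Int) i =>
      let q := if i ∈ PySem.List.pyRange 1 3 1 then (p.1 + 1, p.2) else p
      if i ∈ PySem.List.pyRange 3 10 1 then (q.1, q.2 + 1) else q)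
    (0, 0)
  [st.1, st.2]

-- ===== PORT B =====
def config_elec_alt (Z : Int) : List Int :=
  [min (max Z 0) 2, min (max (Z - 2) 0) 7]

-- ===== PRECONDITION & SPEC =====
def Spec_config_elec (Z : Int) (out : List Int) : Prop := out = config_elec_alt Z
instance (Z : Int) (out : List Int) : Decidable (Spec_config_elec Z out) := by unfold Spec_config_elec; infer_instance

-- ===== CLAIM (what is proved, stated in full; the proofs are below) =====
def Claim_equal_config_elec : Prop := ∀ (Z : Int), Dom_config_elec Z → Spec_config_elec Z (config_elec Z)

-- ===== LEMMAS AND PROOFS =====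

-- loop invariant: the fold over 1..n counts min(n,2) and min(max(n-2,0),7)
theorem config_elec_fold (n : Nat) :
    (PySem.List.pyRange 1 ((n : Int) + 1) 1).foldl
      (fun (p : Int × Int) i =>
        let q := if i ∈ PySem.List.pyRange 1 3 1 then (p.1 + 1, p.2) else p
        if i ∈ PySem.List.pyRange 3 10 1 then (q.1, q.2 + 1) else q)
      (0, 0)
      = (min (n : Int) 2, min (max ((n : Int) - 2) 0) 7) := by
  induction n with
  | zero =>
    simp only [Nat.cast_zero, zero_add]
    rw [PySem.List.pyRange_one_eq_nil (a := 1) (b := 1) (by omega)]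
    simp
  | succ k ih =>
    have h : ((k : Int) + 1 + 1) = ((k : Int) + 1) + 1 := by ring
    rw [show ((k + 1 : Nat) : Int) = (k : Int) + 1 by push_cast; ring, h,
        PySem.List.pyRange_one_succ_right (by omega), List.foldl_append, ih]
    simp only [List.foldl_cons, List.foldl_nil, PySem.List.mem_pyRange_one]
    split_ifs <;> simp only [Prod.mk.injEq] <;> constructor <;> omega

theorem config_elec_spec : Claim_equal_config_elec := by
  intro Z _
  unfold Spec_config_elec config_elec config_elec_alt
  by_cases hZ : Z ≤ 0
  · rw [PySem.List.pyRange_one_eq_nil (a := 1) (b := Z + 1) (by omega)]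
    simp only [List.foldl_nil]
    have h1 : min (max Z 0) 2 = 0 := by omega
    have h2 : min (max (Z - 2) 0) 7 = 0 := by omega
    rw [h1, h2]
  · have hn : Z = ((Z.toNat : Nat) : Int) := by omega
    rw [hn, config_elec_fold]
    have h1 : min ((Z.toNat : Int)) 2 = min (max ((Z.toNat : Int)) 0) 2 := by omega
    rw [h1]
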